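-- pv_equiv track=rewrite | github.com/filip-husnik/pseudofinder | modules/sleuth.py | degapper
-- ===== SOURCE A (Python) =====
-- def degapper(seq1, seq2):
--
--     """
--     Seqs need to be the same length,
--     from an alignment
--     """
--
--     gaps1 = ''
--     gaps2 = ''
--     newSeq1 = ''
--     newSeq2 = ''
--     for i in range(len(seq1)):
--         if "-" not in [seq1[i], seq2[i]]:
--             if len(gaps1) > 0:
--                 if len(gaps1) % 3 == 0:
--                     gaps1 = ''
--                     gaps2 = ''
--                     newSeq1 += seq1[i]
--                     newSeq2 += seq2[i]
--                 else:
--                     newSeq1 += gaps1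
--                     newSeq2 += gaps2
--                     gaps1 = ''
--                     gaps2 = ''
--                     newSeq1 += seq1[i]
--                     newSeq2 += seq2[i]
--             else:
--                 newSeq1 += seq1[i]
--                 newSeq2 += seq2[i]
--         else:
--             gaps1 += seq1[i]
--             gaps2 += seq2[i]
--     return newSeq1, newSeq2
-- ===== SOURCE B (Python) =====
-- def degapper(seq1, seq2):
--     """
--     Seqs need to be the same length,
--     from an alignment
--     """
--     pairs = list(zip(seq1, seq2))
--     out1 = []
--     out2 = []
--     i = 0
--     n = len(pairs)
--     while i < n:
--         if '-' in pairs[i]: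
--             j = i + 1
--             while j < n and '-' in pairs[j]:
--                 j += 1
--             # a gap run is kept only if it is followed by a non-gap column
--             # and its length is not a multiple of 3
--             if j < n and (j - i) % 3 != 0:
--                 out1.extend(p[0] for p in pairs[i:j])
--                 out2.extend(p[1] for p in pairs[i:j])
--             i = j
--         else:
--             out1.append(pairs[i][0])
--             out2.append(pairs[i][1])
--             i += 1
--     return ''.join(out1), ''.join(out2)
-- ===== Notes on version B (the rewrite author's own statement) =====
-- stated objective: alternative
-- what changed: Replaces A's per-character pending-buffer accumulator (two growing gap strings flushed or reset at each non-gap column) with a run-skipping scan over the zipped columns: each maximal gap run is located wholesale with an inner scan and emitted or dropped as a block, so no pending state is carried between iterations.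
import Mathlib
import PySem

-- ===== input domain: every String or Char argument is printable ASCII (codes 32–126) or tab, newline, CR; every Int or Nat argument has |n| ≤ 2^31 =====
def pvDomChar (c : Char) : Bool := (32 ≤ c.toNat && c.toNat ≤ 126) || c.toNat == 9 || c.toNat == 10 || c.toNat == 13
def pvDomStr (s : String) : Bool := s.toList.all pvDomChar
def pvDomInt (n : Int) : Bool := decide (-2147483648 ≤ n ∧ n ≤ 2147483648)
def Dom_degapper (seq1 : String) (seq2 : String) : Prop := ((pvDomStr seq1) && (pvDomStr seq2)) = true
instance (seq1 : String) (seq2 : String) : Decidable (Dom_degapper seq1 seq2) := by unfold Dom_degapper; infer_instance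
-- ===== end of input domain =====

-- B replaces A's per-character pending-gap-buffer accumulator with a run-skipping scan
-- (each maximal gap run is located wholesale and kept or dropped as a block): an alternative
-- decomposition, same asymptotic cost. Equivalence of the RETURN values is proved on
-- Pre_ (seq1 no longer than seq2; outside it Python A raises IndexError).


-- ===== PORT A =====
-- A's loop over i with state (gaps1, gaps2, newSeq1, newSeq2); the two strings are
-- consumed in lockstep (exact for the admitted inputs, where len(seq1) ≤ len(seq2)).
def degapperGo : List Char → List Char → List Char → List Char → List Char → List Char → List Char × List Char
  | c1 :: t1, c2 :: t2, gaps1, gaps2, new1, new2 =>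
    if !(c1 == '-' || c2 == '-') then
      if gaps1.length > 0 then
        if gaps1.length % 3 = 0 then
          degapperGo t1 t2 [] [] (new1 ++ [c1]) (new2 ++ [c2])
        else
          degapperGo t1 t2 [] [] (new1 ++ gaps1 ++ [c1]) (new2 ++ gaps2 ++ [c2])
      else
        degapperGo t1 t2 gaps1 gaps2 (new1 ++ [c1]) (new2 ++ [c2])
    else
      degapperGo t1 t2 (gaps1 ++ [c1]) (gaps2 ++ [c2]) new1 new2
  | _, _, _, _, new1, new2 => (new1, new2)

def degapper (seq1 : String) (seq2 : String) : String × String :=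
  let r := degapperGo seq1.toList seq2.toList [] [] [] []
  (String.ofList r.1, String.ofList r.2)

-- ===== PORT B =====
def pvGap (p : Char × Char) : Bool := p.1 == '-' || p.2 == '-'

def altGo : List (Char × Char) → List Char × List Char
  | [] => ([], [])
  | p :: t =>
    if pvGap p then
      let run := p :: t.takeWhile pvGap
      let rest := t.dropWhile pvGap
      let r := altGo rest
      if !rest.isEmpty && run.length % 3 != 0 then
        (run.map Prod.fst ++ r.1, run.map Prod.snd ++ r.2)
      else r
    else
      let r := altGo t
      (p.1 :: r.1, p.2 :: r.2)
  termination_by l => l.length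
  decreasing_by
  · exact Nat.lt_succ_of_le (List.length_dropWhile_le pvGap t)
  · simp

def degapper_alt (seq1 : String) (seq2 : String) : String × String :=
  let r := altGo (seq1.toList.zip seq2.toList)
  (String.ofList r.1, String.ofList r.2)

-- ===== PRECONDITION & SPEC =====
-- Pre_ excludes exactly the inputs where Python A raises IndexError (seq2 shorter than seq1).
def Pre_degapper (seq1 : String) (seq2 : String) : Prop := seq1.length ≤ seq2.length
instance (seq1 : String) (seq2 : String) : Decidable (Pre_degapper seq1 seq2) := by unfold Pre_degapper; infer_instance
def pvWitness_degapper : String × String := ("AC--G", "A-C-G")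

def Spec_degapper (seq1 : String) (seq2 : String) (out : String × String) : Prop := out = degapper_alt seq1 seq2
instance (seq1 : String) (seq2 : String) (out : String × String) : Decidable (Spec_degapper seq1 seq2 out) := by unfold Spec_degapper; infer_instance

-- ===== CLAIM (what is proved, stated in full; the proofs are below) =====
def Claim_equal_degapper : Prop := ∀ (seq1 : String) (seq2 : String), Dom_degapper seq1 seq2 → Pre_degapper seq1 seq2 → Spec_degapper seq1 seq2 (degapper seq1 seq2)

-- ===== LEMMAS AND PROOFS =====

-- Reference form of the result over the zipped column list, with the pending gap run as a pair list.
def pvRef : List (Char × Char) → List (Char × Char) → List (Char × Char)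
  | _, [] => []
  | pend, p :: t =>
    if pvGap p then pvRef (pend ++ [p]) t
    else (if pend.length % 3 = 0 then [] else pend) ++ p :: pvRef [] t

lemma degapperGo_eq (l1 : List Char) : ∀ (l2 : List Char) (pend : List (Char × Char)) (new1 new2 : List Char),
    degapperGo l1 l2 (pend.map Prod.fst) (pend.map Prod.snd) new1 new2
      = (new1 ++ (pvRef pend (l1.zip l2)).map Prod.fst,
         new2 ++ (pvRef pend (l1.zip l2)).map Prod.snd) := by
  induction l1 with
  | nil => intro l2 pend new1 new2; simp [degapperGo, pvRef]
  | cons c1 t1 ih =>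
    intro l2 pend new1 new2
    cases l2 with
    | nil => simp [degapperGo, pvRef]
    | cons c2 t2 =>
      by_cases hg : (c1 == '-' || c2 == '-') = true
      · -- gap column: accumulate into the pending run
        have h1 : degapperGo (c1 :: t1) (c2 :: t2) (pend.map Prod.fst) (pend.map Prod.snd) new1 new2
            = degapperGo t1 t2 ((pend ++ [(c1, c2)]).map Prod.fst) ((pend ++ [(c1, c2)]).map Prod.snd) new1 new2 := by
          simp [degapperGo, hg]
        rw [h1, ih]
        have h2 : pvRef pend ((c1 :: t1).zip (c2 :: t2)) = pvRef (pend ++ [(c1, c2)]) (t1.zip t2) := by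
          simp [pvRef, pvGap, hg]
        rw [h2]
      · rw [Bool.not_eq_true] at hg
        cases pend with
        | nil =>
          simp only [List.map_nil]
          have hstep : degapperGo (c1 :: t1) (c2 :: t2) [] [] new1 new2
              = degapperGo t1 t2 [] [] (new1 ++ [c1]) (new2 ++ [c2]) := by
            simp [degapperGo, hg]
          rw [hstep]
          have hih := ih t2 [] (new1 ++ [c1]) (new2 ++ [c2])
          simp only [List.map_nil] at hih
          rw [hih]
          simp [pvRef, pvGap, hg]
        | cons q qs =>
          by_cases h3 : (qs.length + 1) % 3 = 0
          · have hstep : degapperGo (c1 :: t1) (c2 :: t2) ((q :: qs).map Prod.fst) ((q :: qs).map Prod.snd) new1 new2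
                = degapperGo t1 t2 [] [] (new1 ++ [c1]) (new2 ++ [c2]) := by
              simp [degapperGo, hg, h3]
            rw [hstep]
            have hih := ih t2 [] (new1 ++ [c1]) (new2 ++ [c2])
            simp only [List.map_nil] at hih
            rw [hih]
            simp [pvRef, pvGap, hg, h3]
          · have hstep : degapperGo (c1 :: t1) (c2 :: t2) ((q :: qs).map Prod.fst) ((q :: qs).map Prod.snd) new1 new2
                = degapperGo t1 t2 [] []
                    (new1 ++ (q :: qs).map Prod.fst ++ [c1]) (new2 ++ (q :: qs).map Prod.snd ++ [c2]) := by
              simp [degapperGo, hg, h3]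
            rw [hstep]
            have hih := ih t2 [] (new1 ++ (q :: qs).map Prod.fst ++ [c1]) (new2 ++ (q :: qs).map Prod.snd ++ [c2])
            simp only [List.map_nil] at hih
            rw [hih]
            simp [pvRef, pvGap, hg, h3]

lemma head_dropWhile_false {α : Type} (f : α → Bool) : ∀ (t : List α) (q : α) (r : List α),
    t.dropWhile f = q :: r → f q = false := by
  intro t
  induction t with
  | nil => intro q r h; simp [List.dropWhile] at h
  | cons a t ih =>
    intro q r h
    by_cases ha : f a
    · rw [List.dropWhile_cons_of_pos ha] at h; exact ih q r h
    · rw [List.dropWhile_cons_of_neg (by simpa using ha)] at h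
      cases h; simpa using ha

lemma pvRef_drop_nil : ∀ (t pend : List (Char × Char)), t.dropWhile pvGap = [] → pvRef pend t = [] := by
  intro t
  induction t with
  | nil => intro pend _; simp [pvRef]
  | cons p t ih =>
    intro pend h
    by_cases hp : pvGap p
    · rw [List.dropWhile_cons_of_pos hp] at h
      simp [pvRef, hp, ih _ h]
    · rw [List.dropWhile_cons_of_neg (by simpa using hp)] at h
      simp at h

lemma pvRef_drop_cons : ∀ (t : List (Char × Char)) (pend : List (Char × Char)) (q : Char × Char) (r : List (Char × Char)),
    t.dropWhile pvGap = q :: r →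
    pvRef pend t = (if (pend.length + (t.takeWhile pvGap).length) % 3 = 0 then []
                    else pend ++ t.takeWhile pvGap) ++ q :: pvRef [] r := by
  intro t
  induction t with
  | nil => intro pend q r h; simp [List.dropWhile] at h
  | cons p t ih =>
    intro pend q r h
    by_cases hp : pvGap p
    · rw [List.dropWhile_cons_of_pos hp] at h
      have := ih (pend ++ [p]) q r h
      rw [show pvRef pend (p :: t) = pvRef (pend ++ [p]) t from by simp [pvRef, hp], this]
      rw [List.takeWhile_cons_of_pos hp]
      have hc : ((pend ++ [p]).length + (t.takeWhile pvGap).length) % 3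
          = (pend.length + (p :: t.takeWhile pvGap).length) % 3 := by
        simp; omega
      rw [hc]
      split_ifs with hif
      · rfl
      · simp
    · rw [List.dropWhile_cons_of_neg (by simpa using hp)] at h
      cases h
      rw [List.takeWhile_cons_of_neg (by simpa using hp)]
      simp [pvRef, hp]

lemma altGo_eq : ∀ (n : Nat) (l : List (Char × Char)), l.length ≤ n →
    altGo l = ((pvRef [] l).map Prod.fst, (pvRef [] l).map Prod.snd) := by
  intro n
  induction n with
  | zero =>
    intro l hl
    have : l = [] := List.eq_nil_of_length_eq_zero (Nat.le_zero.mp hl)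
    subst this; simp [altGo, pvRef]
  | succ n ih =>
    intro l hl
    cases l with
    | nil => simp [altGo, pvRef]
    | cons p t =>
      by_cases hp : pvGap p
      · rw [show pvRef [] (p :: t) = pvRef ([] ++ [p]) t from by simp [pvRef, hp]]
        simp only [List.nil_append]
        cases hd : t.dropWhile pvGap with
        | nil =>
          rw [pvRef_drop_nil t [p] hd]
          simp [altGo, hp, hd]
        | cons q r =>
          have hq : pvGap q = false := head_dropWhile_false pvGap t q r hd
          have hrlen : r.length ≤ n := by
            have h1 : (q :: r).length ≤ t.length := hd ▸ List.length_dropWhile_le pvGap t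
            simp at h1 hl; omega
          rw [pvRef_drop_cons t [p] q r hd]
          have haltq : altGo (q :: r) = (q.1 :: (altGo r).1, q.2 :: (altGo r).2) := by
            simp [altGo, hq]
          rw [show altGo (p :: t) =
              (if !(t.dropWhile pvGap).isEmpty && (p :: t.takeWhile pvGap).length % 3 != 0 then
                ((p :: t.takeWhile pvGap).map Prod.fst ++ (altGo (t.dropWhile pvGap)).1,
                 (p :: t.takeWhile pvGap).map Prod.snd ++ (altGo (t.dropWhile pvGap)).2)
              else altGo (t.dropWhile pvGap)) from by simp [altGo, hp]]
          rw [hd, haltq, ih r hrlen]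
          rw [show ([p].length + (t.takeWhile pvGap).length) = ((t.takeWhile pvGap).length + 1) from by
            simp; omega]
          by_cases h3 : ((t.takeWhile pvGap).length + 1) % 3 = 0
          · simp [h3]
          · simp [h3]
      · have hlt : t.length ≤ n := by simp at hl; omega
        rw [show altGo (p :: t) = (p.1 :: (altGo t).1, p.2 :: (altGo t).2) from by
              simp [altGo, hp],
            ih t hlt]
        simp [pvRef, hp]

-- ===== VERDICT (by name: the statement is the Claim_ definition above) =====
theorem degapper_spec : Claim_equal_degapper := by
  intro seq1 seq2 _ _
  unfold Spec_degapper degapper degapper_alt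
  have hA := degapperGo_eq seq1.toList seq2.toList [] [] []
  simp only [List.map_nil] at hA
  rw [hA, altGo_eq (seq1.toList.zip seq2.toList).length _ le_rfl]
  simp
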